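-- pv_equiv track=rewrite | github.com/andresdh/CodeFights | 08_matrixElementsSum.py | matrixElementsSum
-- ===== SOURCE A (Python) =====
-- def matrixElementsSum(matrix):
--
--     numrows = len(matrix)
--     numcols = len(matrix[0])
--     matrix_sum = []
--
--     for i in range(numcols):
--         for j in range(numrows):
--
--             x = matrix[j][i]
--             if x == 0:
--                 break
--             else:
--                 matrix_sum.append(x)
--
--     return sum(matrix_sum)
-- ===== SOURCE B (Python) =====
-- def matrixElementsSum(matrix):
--     alive = [True] * len(matrix[0])
--     total = 0
--     for row in matrix:
--         new_alive = []
--         for a, x in zip(alive, row):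
--             keep = a and x != 0
--             if keep:
--                 total += x
--             new_alive.append(keep)
--         alive = new_alive
--     return total
-- ===== Notes on version B (the rewrite author's own statement) =====
-- stated objective: alternative
-- what changed: Column-major scan with a per-column break is replaced by a single row-major pass that carries a per-column alive mask (zip of mask and row), adding live nonzero entries to a running total instead of collecting them in a list.
import Mathlib
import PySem

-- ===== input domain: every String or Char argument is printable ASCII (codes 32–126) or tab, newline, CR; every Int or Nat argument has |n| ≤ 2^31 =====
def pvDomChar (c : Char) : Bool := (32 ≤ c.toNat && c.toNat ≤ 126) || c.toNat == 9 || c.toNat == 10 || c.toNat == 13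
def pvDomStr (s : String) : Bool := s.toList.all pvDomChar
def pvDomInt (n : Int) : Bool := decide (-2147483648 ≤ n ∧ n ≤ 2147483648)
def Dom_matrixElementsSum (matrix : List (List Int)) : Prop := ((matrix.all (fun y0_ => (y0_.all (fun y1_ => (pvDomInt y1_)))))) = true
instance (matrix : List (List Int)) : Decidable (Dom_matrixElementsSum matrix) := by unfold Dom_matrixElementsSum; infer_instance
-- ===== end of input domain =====

-- B replaces A's column-major scan-with-break by one row-major pass over an alive-column mask; equivalence proved on every input where A returns.

-- ===== PORT A =====
-- inner 'for j' loop of A for one column i: walk rows, break at a zero, append otherwise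
-- (row access uses getD; on Pre_ inputs every cell read before the break is in range)
def colA : List (List Int) → Nat → List Int
  | [], _ => []
  | r :: rs, i =>
    let x := r.getD i 0
    if x = 0 then [] else x :: colA rs i

def matrixElementsSum (matrix : List (List Int)) : Int :=
  let numcols := (matrix.headD []).length
  let matrix_sum := (List.range numcols).foldl (fun acc i => acc ++ colA matrix i) []
  matrix_sum.sum

-- ===== PORT B =====
-- body of B's inner 'for a, x in zip(alive, row)' loop: state = (new_alive, total)
def rowStepB (st : List Bool × Int) (p : Bool × Int) : List Bool × Int :=
  let keep := p.1 && p.2 != 0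
  (st.1 ++ [keep], if keep then st.2 + p.2 else st.2)

-- one row of B's outer loop: state = (alive, total)
def stepB (st : List Bool × Int) (row : List Int) : List Bool × Int :=
  (st.1.zip row).foldl rowStepB ([], st.2)

def matrixElementsSum_alt (matrix : List (List Int)) : Int :=
  let n := (matrix.headD []).length
  (matrix.foldl stepB (List.replicate n true, 0)).2

-- ===== PRECONDITION & SPEC =====
-- Pre_ is exactly the closed-form condition under which the Python A returns normally:
-- the matrix is non-empty, and whenever a scanned column index i < len(matrix[0]) falls
-- outside row j, some earlier row carries an in-range zero in that column (so A's
-- per-column break fires before the out-of-range access); on the complement A raises IndexError.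
def Pre_matrixElementsSum (matrix : List (List Int)) : Prop :=
  matrix ≠ [] ∧ ∀ j < matrix.length, ∀ i < (matrix.headD []).length,
    (matrix.getD j []).length ≤ i →
      ∃ j' < j, i < (matrix.getD j' []).length ∧ (matrix.getD j' []).getD i 0 = 0
instance (matrix : List (List Int)) : Decidable (Pre_matrixElementsSum matrix) := by
  unfold Pre_matrixElementsSum; infer_instance

def pvWitness_matrixElementsSum : List (List Int) := [[1, 0], [2, 3]]

def Spec_matrixElementsSum (matrix : List (List Int)) (out : Int) : Prop := out = matrixElementsSum_alt matrix
instance (matrix : List (List Int)) (out : Int) : Decidable (Spec_matrixElementsSum matrix out) := by unfold Spec_matrixElementsSum; infer_instance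

-- ===== CLAIM (what is proved, stated in full; the proofs are below) =====
def Claim_equal_matrixElementsSum : Prop := ∀ (matrix : List (List Int)), Dom_matrixElementsSum matrix → Pre_matrixElementsSum matrix → Spec_matrixElementsSum matrix (matrixElementsSum matrix)

-- ===== LEMMAS AND PROOFS =====

-- A's accumulating fold of appended column segments, summed
theorem sum_foldl_append (L : List Nat) (f : Nat → List Int) (acc : List Int) :
    ((L.foldl (fun a i => a ++ f i) acc)).sum = acc.sum + (L.map (fun i => (f i).sum)).sum := by
  induction L generalizing acc with
  | nil => simp
  | cons i L ih =>
    rw [List.foldl_cons, ih, List.sum_append]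
    simp only [List.map_cons, List.sum_cons]
    ring

theorem sum_map_range (n : Nat) (g : Nat → Int) :
    ((List.range n).map g).sum = ∑ i ∈ Finset.range n, g i := by
  induction n with
  | zero => simp
  | succ n ih => simp [List.range_succ, Finset.sum_range_succ, ih]

-- B's inner fold in closed form
theorem rowStepB_fold (l : List (Bool × Int)) (na : List Bool) (t : Int) :
    l.foldl rowStepB (na, t)
      = (na ++ l.map (fun p => p.1 && p.2 != 0),
         t + (l.map (fun p => if p.1 && p.2 != 0 then p.2 else 0)).sum) := by
  induction l generalizing na t with
  | nil => simp
  | cons p l ih =>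
    simp only [List.foldl_cons, rowStepB, List.map_cons, List.sum_cons, ih]
    by_cases h : (p.1 && p.2 != 0) = true
    · simp [h]; ring
    · simp [h]

theorem zip_map_sum (alive : List Bool) (r : List Int) (f : Bool × Int → Int) :
    ((alive.zip r).map f).sum
      = ∑ i ∈ Finset.range (min alive.length r.length), f (alive.getD i false, r.getD i 0) := by
  induction alive generalizing r with
  | nil => simp
  | cons a as ih =>
    cases r with
    | nil => simp
    | cons x xs =>
      simp only [List.zip_cons_cons, List.map_cons, List.sum_cons, List.length_cons,
        Nat.succ_min_succ, Finset.sum_range_succ']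
      rw [ih xs]
      simp [add_comm]

theorem getD_zip_keep (alive : List Bool) (r : List Int) (i : Nat)
    (hi : i < alive.length) (hir : i < r.length) :
    ((alive.zip r).map (fun p => p.1 && p.2 != 0)).getD i false
      = (alive.getD i false && (r.getD i 0 != 0)) := by
  induction alive generalizing r i with
  | nil => simp at hi
  | cons a as ih =>
    cases r with
    | nil => simp at hir
    | cons x xs =>
      cases i with
      | zero => simp
      | succ i =>
        simp only [List.length_cons] at hi hir
        simpa using ih xs i (by omega) (by omega)

-- loop invariant condition for B: any column index that falls outside some row of the
-- remaining matrix is either already dead in the mask or killed by an earlier in-range zero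
def Pcond (m : List (List Int)) (alive : List Bool) : Prop :=
  ∀ j < m.length, ∀ i < alive.length, (m.getD j []).length ≤ i →
    alive.getD i false = false ∨
      ∃ j' < j, i < (m.getD j' []).length ∧ (m.getD j' []).getD i 0 = 0

theorem Pcond_step (r : List Int) (rs : List (List Int)) (alive : List Bool)
    (h : Pcond (r :: rs) alive) :
    Pcond rs ((alive.zip r).map (fun p => p.1 && p.2 != 0)) := by
  intro j hj i hi hshort
  have hi' : i < min alive.length r.length := by simpa using hi
  have hia : i < alive.length := by omega
  have hir : i < r.length := by omega
  have h2 := h (j + 1) (by simpa using Nat.succ_lt_succ hj) i hia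
    (by simpa [List.getD_cons_succ] using hshort)
  rcases h2 with hfalse | ⟨j', hj', hrange, hzero⟩
  · left; rw [getD_zip_keep _ _ _ hia hir, hfalse]; simp
  · cases j' with
    | zero =>
      left
      rw [getD_zip_keep _ _ _ hia hir]
      simp only [List.getD_cons_zero] at hzero
      simp only [List.getD] at hzero
      simp [hzero]
    | succ k =>
      right
      exact ⟨k, by omega, by simpa [List.getD_cons_succ] using hrange,
        by simpa [List.getD_cons_succ] using hzero⟩

-- invariant of B's outer loop
theorem B_inv (m : List (List Int)) (alive : List Bool) (t : Int) (hP : Pcond m alive) :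
    (m.foldl stepB (alive, t)).2
      = t + ∑ i ∈ Finset.range alive.length,
          (if alive.getD i false then (colA m i).sum else 0) := by
  induction m generalizing alive t with
  | nil => simp [colA]
  | cons r rs ih =>
    have hstep : stepB (alive, t) r
        = ((alive.zip r).map (fun p => p.1 && p.2 != 0),
           t + ((alive.zip r).map (fun p => if p.1 && p.2 != 0 then p.2 else 0)).sum) := by
      simp [stepB, rowStepB_fold]
    have hP' := Pcond_step r rs alive hP
    simp only [List.foldl_cons, hstep]
    rw [ih _ _ hP']
    have hlen' : ((alive.zip r).map (fun p => p.1 && p.2 != 0)).length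
        = min alive.length r.length := by simp
    rw [hlen', zip_map_sum]
    have hmin : min alive.length r.length ≤ alive.length := Nat.min_le_left _ _
    have hA : ∑ i ∈ Finset.range alive.length,
          (if alive.getD i false then (colA (r :: rs) i).sum else 0)
        = ∑ i ∈ Finset.range (min alive.length r.length),
            (if alive.getD i false then (colA (r :: rs) i).sum else 0) := by
      rw [Finset.range_eq_Ico,
        ← Finset.sum_Ico_consecutive _ (Nat.zero_le _) hmin]
      have hz : ∑ i ∈ Finset.Ico (min alive.length r.length) alive.length,
          (if alive.getD i false then (colA (r :: rs) i).sum else 0) = 0 := by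
        apply Finset.sum_eq_zero
        intro i hi
        rw [Finset.mem_Ico] at hi
        have hile : r.length ≤ i := by omega
        have h0 := hP 0 (by simp) i hi.2 (by simpa using hile)
        rcases h0 with hf | ⟨j', hj', _⟩
        · simp only [List.getD] at hf
          simp [hf]
        · omega
      rw [hz, add_zero]
    rw [hA, add_assoc, ← Finset.sum_add_distrib]
    congr 1
    apply Finset.sum_congr rfl
    intro i hi
    rw [Finset.mem_range] at hi
    have hia : i < alive.length := by omega
    have hir : i < r.length := by omega
    rw [getD_zip_keep alive r i hia hir]
    simp only [List.getD] at *
    by_cases ha : alive[i]?.getD false = true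
    · by_cases hz : r[i]?.getD 0 = 0
      · simp [colA, List.getD, ha, hz]
      · simp [colA, List.getD, ha, hz]
    · simp [ha]

theorem getD_replicate_true (n i : Nat) (hi : i < n) :
    (List.replicate n true).getD i false = true := by
  simp [List.getD, hi]

-- ===== VERDICT (by name: the statement is the Claim_ definition above) =====
theorem matrixElementsSum_spec : Claim_equal_matrixElementsSum := by
  intro matrix _ hpre
  obtain ⟨-, hcol⟩ := hpre
  unfold Spec_matrixElementsSum matrixElementsSum matrixElementsSum_alt
  simp only
  rw [sum_foldl_append, sum_map_range]
  have hP : Pcond matrix (List.replicate (matrix.headD []).length true) := by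
    intro j hj i hi hshort
    right
    exact hcol j hj i (by simpa using hi) hshort
  rw [B_inv matrix _ 0 hP, List.length_replicate]
  simp only [List.sum_nil, zero_add]
  apply Finset.sum_congr rfl
  intro i hi
  rw [Finset.mem_range] at hi
  rw [getD_replicate_true _ _ hi]
  simp
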